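-- pv_equiv track=rewrite | github.com/hongyiheng/lc-base-on-doocs | Depth-First Search/2556.Disconnect Path in a Binary Matrix by at Most One Flip/Solution.py | isPossibleToCutPath
-- ===== SOURCE A (Python) =====
-- from typing import List
--
-- def isPossibleToCutPath(grid: List[List[int]]) -> bool:
--     def dfs(x, y):
--         if x == m - 1 and y == n - 1:
--             return True
--         grid[x][y] = 0
--         ans = False
--         for d in [[0, 1], [1, 0]]:
--             nx, ny = x + d[0], y + d[1]
--             if nx < 0 or nx >= m or ny < 0 or ny >= n:
--                 continue
--             if not grid[nx][ny]:
--                 continue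
--             ans = ans or dfs(nx, ny)
--         return ans
--
--     m, n = len(grid), len(grid[0])
--     if not grid[0][0] or not grid[m - 1][n - 1]:
--         return True
--     return not dfs(0, 0) or not dfs(0, 0)
-- ===== SOURCE B (Python) =====
-- from typing import List
--
-- def isPossibleToCutPath(grid: List[List[int]]) -> bool:
--     m, n = len(grid), len(grid[0])
--
--     def run():
--         # iterative DFS with an explicit stack; cells are validated when popped
--         if m == 1 and n == 1:
--             return True
--         grid[0][0] = 0
--         stack = [(1, 0), (0, 1)]
--         while stack:
--             x, y = stack.pop()
--             if x < 0 or x >= m or y < 0 or y >= n or not grid[x][y]: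
--                 continue
--             if x == m - 1 and y == n - 1:
--                 return True
--             grid[x][y] = 0
--             stack.append((x + 1, y))
--             stack.append((x, y + 1))
--         return False
--
--     if not grid[0][0] or not grid[m - 1][n - 1]:
--         return True
--     return not run() or not run()
-- ===== Notes on version B (the rewrite author's own statement) =====
-- stated objective: alternative
-- what changed: A's recursive dfs (right-then-down with 'ans or dfs' short-circuit) is replaced by an iterative DFS over an explicit stack that validates bounds/truthiness at pop time and returns on the first target pop; the outer guard and the two sequential runs are kept.
-- outside the precondition, e.g. on isPossibleToCutPath([[0, 1], [1]]): A returns True, B returns True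
import Mathlib
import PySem

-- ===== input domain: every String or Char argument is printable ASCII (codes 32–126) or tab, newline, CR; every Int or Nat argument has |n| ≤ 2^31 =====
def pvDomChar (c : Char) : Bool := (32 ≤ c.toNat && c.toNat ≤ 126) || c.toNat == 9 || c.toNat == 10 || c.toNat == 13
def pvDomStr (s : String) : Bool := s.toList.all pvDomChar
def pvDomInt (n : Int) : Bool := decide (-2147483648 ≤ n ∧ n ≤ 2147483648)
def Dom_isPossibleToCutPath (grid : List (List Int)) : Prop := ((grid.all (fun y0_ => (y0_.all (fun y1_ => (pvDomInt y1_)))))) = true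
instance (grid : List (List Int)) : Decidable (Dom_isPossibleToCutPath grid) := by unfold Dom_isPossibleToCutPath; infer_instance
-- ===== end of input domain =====

-- ===== PORT A =====
-- B replaces A's recursive dfs by an iterative DFS with an explicit stack; both Pythons
-- mutate the grid argument identically, and the equivalence proved here is about the
-- return value. Fuel makes each recursion structural; the stated fuels bound the
-- recursion depth / loop steps, so behaviour matches the Python.
-- pget/pset are Python's grid[x][y] read/write; used only under in-bounds guards, where they are exact.
def pget (g : List (List Int)) (x y : Int) : Int := (g.getD x.toNat []).getD y.toNat 0
def pset (g : List (List Int)) (x y : Int) : List (List Int) :=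
  g.set x.toNat ((g.getD x.toNat []).set y.toNat 0)

def dfsA (m n : Int) : Nat → Int → Int → List (List Int) → Bool × List (List Int)
  | 0, _, _, g => (false, g)
  | fuel + 1, x, y, g =>
    if x = m - 1 ∧ y = n - 1 then (true, g)
    else
      let g0 := pset g x y
      let p1 := if x < 0 ∨ x ≥ m ∨ y + 1 < 0 ∨ y + 1 ≥ n ∨ pget g0 x (y + 1) = 0
                then (false, g0) else dfsA m n fuel x (y + 1) g0
      if p1.1 then (true, p1.2)
      else if x + 1 < 0 ∨ x + 1 ≥ m ∨ y < 0 ∨ y ≥ n ∨ pget p1.2 (x + 1) y = 0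
           then (false, p1.2) else dfsA m n fuel (x + 1) y p1.2

def isPossibleToCutPath (grid : List (List Int)) : Bool :=
  let m : Int := grid.length
  let n : Int := (grid.headD []).length
  if pget grid 0 0 = 0 ∨ pget grid (m - 1) (n - 1) = 0 then true
  else
    let r1 := dfsA m n ((m + n).toNat + 1) 0 0 grid
    if !r1.1 then true else !(dfsA m n ((m + n).toNat + 1) 0 0 r1.2).1

def nzc (g : List (List Int)) : Nat := (g.map (List.countP (fun v => decide (v ≠ 0)))).sum

def loopB (m n : Int) : Nat → List (Int × Int) → List (List Int) → Bool × List (List Int)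
  | 0, _, g => (false, g)
  | _ + 1, [], g => (false, g)
  | fl + 1, (x, y) :: rest, g =>
    if x < 0 ∨ x ≥ m ∨ y < 0 ∨ y ≥ n ∨ pget g x y = 0 then loopB m n fl rest g
    else if x = m - 1 ∧ y = n - 1 then (true, g)
    else loopB m n fl ((x, y + 1) :: (x + 1, y) :: rest) (pset g x y)

def runB (m n : Int) (g : List (List Int)) : Bool × List (List Int) :=
  if m = 1 ∧ n = 1 then (true, g)
  else loopB m n (2 * nzc (pset g 0 0) + 4) [(0, 1), (1, 0)] (pset g 0 0)

def isPossibleToCutPath_alt (grid : List (List Int)) : Bool :=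
  let m : Int := grid.length
  let n : Int := (grid.headD []).length
  if pget grid 0 0 = 0 ∨ pget grid (m - 1) (n - 1) = 0 then true
  else
    let r1 := runB m n grid
    if !r1.1 then true else !(runB m n r1.2).1

-- ===== PRECONDITION & SPEC =====
-- Pre_ restricts to nonempty grids whose first row is nonempty and whose every row has at
-- least len(grid[0]) entries: on shorter rows A raises IndexError whenever its DFS reaches a
-- missing cell (some such ragged grids still return via the early zero guard, see cites).
def Pre_isPossibleToCutPath (grid : List (List Int)) : Prop :=
  grid ≠ [] ∧ 0 < (grid.headD []).length ∧
    ∀ r ∈ grid, (grid.headD []).length ≤ r.length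
instance (grid : List (List Int)) : Decidable (Pre_isPossibleToCutPath grid) := by
  unfold Pre_isPossibleToCutPath; infer_instance

def pvWitness_isPossibleToCutPath : List (List Int) := [[1, 1], [1, 1]]

def Spec_isPossibleToCutPath (grid : List (List Int)) (out : Bool) : Prop := out = isPossibleToCutPath_alt grid
instance (grid : List (List Int)) (out : Bool) : Decidable (Spec_isPossibleToCutPath grid out) := by unfold Spec_isPossibleToCutPath; infer_instance

-- ===== CLAIM (what is proved, stated in full; the proofs are below) =====
def Claim_equal_isPossibleToCutPath : Prop := ∀ (grid : List (List Int)), Dom_isPossibleToCutPath grid → Pre_isPossibleToCutPath grid → Spec_isPossibleToCutPath grid (isPossibleToCutPath grid)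

-- ===== LEMMAS AND PROOFS =====

theorem countP_set_lt (l : List Int) (j : Nat) (h : l.getD j 0 ≠ 0) :
    List.countP (fun v => decide (v ≠ 0)) (l.set j 0) < List.countP (fun v => decide (v ≠ 0)) l := by
  induction l generalizing j with
  | nil => simp [List.getD] at h
  | cons a t ih =>
    cases j with
    | zero =>
      simp only [List.getD, List.getElem?_cons_zero, Option.getD_some] at h
      simp [List.set, h]
    | succ j =>
      simp only [List.getD, List.getElem?_cons_succ] at h
      have := ih j h
      simp only [List.set, List.countP_cons]
      omega

theorem countP_set_le (l : List Int) (j : Nat) :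
    List.countP (fun v => decide (v ≠ 0)) (l.set j 0) ≤ List.countP (fun v => decide (v ≠ 0)) l := by
  induction l generalizing j with
  | nil => simp
  | cons a t ih =>
    cases j with
    | zero => simp [List.set, List.countP_cons]
    | succ j =>
      have := ih j
      simp only [List.set, List.countP_cons]
      omega

theorem nzc_pset_lt (g : List (List Int)) (x y : Int) (h : pget g x y ≠ 0) :
    nzc (pset g x y) < nzc g := by
  unfold pget at h
  unfold pset nzc
  induction g generalizing x with
  | nil => simp [List.getD] at h
  | cons r t ih =>
    by_cases hx : x.toNat = 0
    · rw [hx] at h ⊢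
      simp only [List.getD, List.getElem?_cons_zero, Option.getD_some] at h
      have := countP_set_lt r y.toNat h
      simp only [List.set, List.map, List.sum_cons, List.getD, List.getElem?_cons_zero,
        Option.getD_some]
      omega
    · obtain ⟨k, hk⟩ : ∃ k, x.toNat = k + 1 := ⟨x.toNat - 1, by omega⟩
      rw [hk] at h ⊢
      simp only [List.getD, List.getElem?_cons_succ] at h
      have := ih (x := (k : Int)) (by simpa [List.getD] using h)
      simp only [List.getD, Int.toNat_natCast] at this
      simp only [List.set, List.map, List.sum_cons, List.getD, List.getElem?_cons_succ]
      omega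

theorem nzc_pset_le (g : List (List Int)) (x y : Int) : nzc (pset g x y) ≤ nzc g := by
  unfold pset nzc
  induction g generalizing x with
  | nil => simp [List.set]
  | cons r t ih =>
    by_cases hx : x.toNat = 0
    · rw [hx]
      have := countP_set_le r y.toNat
      simp only [List.set, List.map, List.sum_cons, List.getD, List.getElem?_cons_zero,
        Option.getD_some]
      omega
    · obtain ⟨k, hk⟩ : ∃ k, x.toNat = k + 1 := ⟨x.toNat - 1, by omega⟩
      rw [hk]
      have := ih (x := (k : Int))
      simp only [List.getD, Int.toNat_natCast] at this
      simp only [List.set, List.map, List.sum_cons, List.getD, List.getElem?_cons_succ]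
      omega

theorem nzc_dfs_le (m n : Int) : ∀ (f : Nat) (x y : Int) (g : List (List Int)),
    nzc ((dfsA m n f x y g).2) ≤ nzc g := by
  intro f
  induction f with
  | zero => intro x y g; simp [dfsA]
  | succ f ih =>
    intro x y g
    rw [dfsA]
    by_cases ht : x = m - 1 ∧ y = n - 1
    · simp [ht]
    · rw [if_neg ht]
      simp only []
      by_cases h1 : x < 0 ∨ x ≥ m ∨ y + 1 < 0 ∨ y + 1 ≥ n ∨ pget (pset g x y) x (y + 1) = 0
      · rw [if_pos h1]
        simp only [Bool.false_eq_true, if_false]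
        by_cases h2 : x + 1 < 0 ∨ x + 1 ≥ m ∨ y < 0 ∨ y ≥ n ∨ pget (pset g x y) (x + 1) y = 0
        · rw [if_pos h2]; exact nzc_pset_le g x y
        · rw [if_neg h2]
          exact Nat.le_trans (ih (x + 1) y (pset g x y)) (nzc_pset_le g x y)
      · rw [if_neg h1]
        by_cases ha1 : (dfsA m n f x (y + 1) (pset g x y)).1 = true
        · simp only [ha1, if_true]
          exact Nat.le_trans (ih x (y + 1) (pset g x y)) (nzc_pset_le g x y)
        · simp only [ha1, Bool.false_eq_true, if_false]
          have hA : nzc ((dfsA m n f x (y + 1) (pset g x y)).2) ≤ nzc g :=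
            Nat.le_trans (ih x (y + 1) (pset g x y)) (nzc_pset_le g x y)
          by_cases h2 : x + 1 < 0 ∨ x + 1 ≥ m ∨ y < 0 ∨ y ≥ n ∨
              pget (dfsA m n f x (y + 1) (pset g x y)).2 (x + 1) y = 0
          · rw [if_pos h2]; exact hA
          · rw [if_neg h2]
            exact Nat.le_trans (ih (x + 1) y _) hA

theorem loopB_irrel (m n : Int) : ∀ (f₁ : Nat) (st : List (Int × Int)) (g : List (List Int)) (f₂ : Nat),
    2 * nzc g + st.length < f₁ → 2 * nzc g + st.length < f₂ →
    loopB m n f₁ st g = loopB m n f₂ st g := by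
  intro f₁
  induction f₁ with
  | zero => intro st g f₂ h₁ _; omega
  | succ f ih =>
    intro st g f₂ h₁ h₂
    obtain ⟨f₂', rfl⟩ : ∃ f₂', f₂ = f₂' + 1 := ⟨f₂ - 1, by omega⟩
    cases st with
    | nil => rw [loopB, loopB]
    | cons p rest =>
      obtain ⟨x, y⟩ := p
      simp only [List.length_cons] at h₁ h₂
      rw [loopB, loopB]
      by_cases hc : x < 0 ∨ x ≥ m ∨ y < 0 ∨ y ≥ n ∨ pget g x y = 0
      · rw [if_pos hc, if_pos hc]
        exact ih rest g f₂' (by omega) (by omega)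
      · rw [if_neg hc, if_neg hc]
        by_cases ht : x = m - 1 ∧ y = n - 1
        · rw [if_pos ht, if_pos ht]
        · rw [if_neg ht, if_neg ht]
          have hnz : pget g x y ≠ 0 := by omega
          have := nzc_pset_lt g x y hnz
          exact ih _ _ f₂' (by simp only [List.length_cons]; omega)
            (by simp only [List.length_cons]; omega)

theorem loop_eq_dfs (m n : Int) (k : Nat) :
    ∀ (x y : Int), (m + n - x - y).toNat ≤ k →
    ∀ (g : List (List Int)) (rest : List (Int × Int)) (fl fd : Nat),
      2 * nzc g + rest.length + 3 ≤ fl → (m + n - x - y).toNat < fd →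
      loopB m n fl ((x, y) :: rest) g =
        if x < 0 ∨ x ≥ m ∨ y < 0 ∨ y ≥ n ∨ pget g x y = 0 then loopB m n (fl - 1) rest g
        else
          let r := dfsA m n fd x y g
          if r.1 then (true, r.2) else loopB m n (fl - 1) rest r.2 := by
  induction k with
  | zero =>
    intro x y hk g rest fl fd hfl hfd
    obtain ⟨fl', rfl⟩ : ∃ fl', fl = fl' + 1 := ⟨fl - 1, by omega⟩
    rw [loopB]
    simp only [Nat.add_sub_cancel]
    by_cases hc : x < 0 ∨ x ≥ m ∨ y < 0 ∨ y ≥ n ∨ pget g x y = 0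
    · rw [if_pos hc, if_pos hc]
    · exfalso; omega
  | succ k ih =>
    intro x y hk g rest fl fd hfl hfd
    obtain ⟨fl', rfl⟩ : ∃ fl', fl = fl' + 1 := ⟨fl - 1, by omega⟩
    obtain ⟨fd', rfl⟩ : ∃ fd', fd = fd' + 1 := ⟨fd - 1, by omega⟩
    rw [loopB]
    simp only [Nat.add_sub_cancel]
    by_cases hc : x < 0 ∨ x ≥ m ∨ y < 0 ∨ y ≥ n ∨ pget g x y = 0
    · rw [if_pos hc, if_pos hc]
    · rw [if_neg hc, if_neg hc]
      by_cases ht : x = m - 1 ∧ y = n - 1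
      · rw [if_pos ht, dfsA, if_pos ht]; simp
      · rw [if_neg ht, dfsA, if_neg ht]
        simp only [Nat.add_sub_cancel]
        have hnz : pget g x y ≠ 0 := by omega
        have hlt := nzc_pset_lt g x y hnz
        rw [ih x (y + 1) (by omega) (pset g x y) ((x + 1, y) :: rest) fl' fd'
          (by simp only [List.length_cons]; omega) (by omega)]
        by_cases h1 : x < 0 ∨ x ≥ m ∨ y + 1 < 0 ∨ y + 1 ≥ n ∨ pget (pset g x y) x (y + 1) = 0
        · rw [if_pos h1, if_pos h1]
          rw [ih (x + 1) y (by omega) (pset g x y) rest (fl' - 1) fd'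
            (by omega) (by omega)]
          simp only [Bool.false_eq_true, if_false]
          by_cases h2 : x + 1 < 0 ∨ x + 1 ≥ m ∨ y < 0 ∨ y ≥ n ∨ pget (pset g x y) (x + 1) y = 0
          · rw [if_pos h2, if_pos h2]
            exact loopB_irrel m n (fl' - 1 - 1) rest (pset g x y) fl' (by omega) (by omega)
          · rw [if_neg h2, if_neg h2]
            by_cases hb : (dfsA m n fd' (x + 1) y (pset g x y)).1 = true
            · simp [hb]
            · simp only [hb, Bool.false_eq_true, if_false]
              have hA : nzc ((dfsA m n fd' (x + 1) y (pset g x y)).2) ≤ nzc (pset g x y) :=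
                nzc_dfs_le m n fd' (x + 1) y (pset g x y)
              exact loopB_irrel m n (fl' - 1 - 1) rest _ fl' (by omega) (by omega)
        · rw [if_neg h1, if_neg h1]
          by_cases ha1 : (dfsA m n fd' x (y + 1) (pset g x y)).1 = true
          · simp [ha1]
          · simp only [ha1, Bool.false_eq_true, if_false]
            have hA1 : nzc ((dfsA m n fd' x (y + 1) (pset g x y)).2) ≤ nzc (pset g x y) :=
              nzc_dfs_le m n fd' x (y + 1) (pset g x y)
            rw [ih (x + 1) y (by omega) ((dfsA m n fd' x (y + 1) (pset g x y)).2) rest (fl' - 1) fd'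
              (by omega) (by omega)]
            by_cases h2 : x + 1 < 0 ∨ x + 1 ≥ m ∨ y < 0 ∨ y ≥ n ∨
                pget ((dfsA m n fd' x (y + 1) (pset g x y)).2) (x + 1) y = 0
            · rw [if_pos h2, if_pos h2]
              exact loopB_irrel m n (fl' - 1 - 1) rest _ fl' (by omega) (by omega)
            · rw [if_neg h2, if_neg h2]
              simp only []
              by_cases hb : (dfsA m n fd' (x + 1) y ((dfsA m n fd' x (y + 1) (pset g x y)).2)).1 = true
              · simp [hb]
              · simp only [hb, Bool.false_eq_true, if_false]
                have hA2 : nzc ((dfsA m n fd' (x + 1) y ((dfsA m n fd' x (y + 1) (pset g x y)).2)).2) ≤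
                    nzc ((dfsA m n fd' x (y + 1) (pset g x y)).2) :=
                  nzc_dfs_le m n fd' (x + 1) y _
                exact loopB_irrel m n (fl' - 1 - 1) rest _ fl' (by omega) (by omega)

theorem runB_eq_dfsA (m n : Int) (g : List (List Int)) (fd : Nat)
    (hm : 1 ≤ m) (hn : 1 ≤ n) (hfd : (m + n).toNat < fd) :
    runB m n g = dfsA m n fd 0 0 g := by
  obtain ⟨fd', rfl⟩ : ∃ fd', fd = fd' + 1 := ⟨fd - 1, by omega⟩
  rw [runB, dfsA]
  by_cases ht : m = 1 ∧ n = 1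
  · rw [if_pos ht, if_pos (by omega : (0:Int) = m - 1 ∧ (0:Int) = n - 1)]
  · rw [if_neg ht, if_neg (by omega : ¬((0:Int) = m - 1 ∧ (0:Int) = n - 1))]
    simp only []
    have e : (0:Int) + 1 = 1 := rfl
    rw [e]
    rw [loop_eq_dfs m n (m + n - 1).toNat 0 1 (by omega) (pset g 0 0) [(1, 0)]
      (2 * nzc (pset g 0 0) + 4) fd' (by simp only [List.length_cons, List.length_nil]; omega) (by omega)]
    by_cases h1 : (0:Int) < 0 ∨ (0:Int) ≥ m ∨ (1:Int) < 0 ∨ (1:Int) ≥ n ∨ pget (pset g 0 0) 0 1 = 0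
    · rw [if_pos h1, if_pos h1]
      rw [loop_eq_dfs m n (m + n - 1).toNat 1 0 (by omega) (pset g 0 0) []
        (2 * nzc (pset g 0 0) + 4 - 1) fd' (by simp only [List.length_nil]; omega) (by omega)]
      simp only [Bool.false_eq_true, if_false]
      by_cases h2 : (1:Int) < 0 ∨ (1:Int) ≥ m ∨ (0:Int) < 0 ∨ (0:Int) ≥ n ∨ pget (pset g 0 0) 1 0 = 0
      · rw [if_pos h2, if_pos h2]
        obtain ⟨w, hw⟩ : ∃ w, 2 * nzc (pset g 0 0) + 4 - 1 - 1 = w + 1 := ⟨2 * nzc (pset g 0 0) + 1, by omega⟩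
        rw [hw, loopB]
      · rw [if_neg h2, if_neg h2]
        cases hb : (dfsA m n fd' 1 0 (pset g 0 0)).1 <;>
          simp only [hb, Bool.false_eq_true, if_false, if_true]
        · obtain ⟨w, hw⟩ : ∃ w, 2 * nzc (pset g 0 0) + 4 - 1 - 1 = w + 1 := ⟨2 * nzc (pset g 0 0) + 1, by omega⟩
          rw [hw, loopB, ← hb]
        · rw [← hb]
    · rw [if_neg h1, if_neg h1]
      simp only []
      by_cases ha1 : (dfsA m n fd' 0 1 (pset g 0 0)).1 = true
      · simp [ha1]
      · simp only [ha1, Bool.false_eq_true, if_false]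
        rw [loop_eq_dfs m n (m + n - 1).toNat 1 0 (by omega) ((dfsA m n fd' 0 1 (pset g 0 0)).2) []
          (2 * nzc (pset g 0 0) + 4 - 1) fd'
          (by have := nzc_dfs_le m n fd' 0 1 (pset g 0 0); simp only [List.length_nil]; omega) (by omega)]
        by_cases h2 : (1:Int) < 0 ∨ (1:Int) ≥ m ∨ (0:Int) < 0 ∨ (0:Int) ≥ n ∨
            pget ((dfsA m n fd' 0 1 (pset g 0 0)).2) 1 0 = 0
        · rw [if_pos h2, if_pos h2]
          obtain ⟨w, hw⟩ : ∃ w, 2 * nzc (pset g 0 0) + 4 - 1 - 1 = w + 1 := ⟨2 * nzc (pset g 0 0) + 1, by omega⟩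
          rw [hw, loopB]
        · rw [if_neg h2, if_neg h2]
          simp only []
          cases hb : (dfsA m n fd' 1 0 ((dfsA m n fd' 0 1 (pset g 0 0)).2)).1 <;>
            simp only [hb, Bool.false_eq_true, if_false, if_true]
          · obtain ⟨w, hw⟩ : ∃ w, 2 * nzc (pset g 0 0) + 4 - 1 - 1 = w + 1 := ⟨2 * nzc (pset g 0 0) + 1, by omega⟩
            rw [hw, loopB, ← hb]
          · rw [← hb]

theorem main_eq (grid : List (List Int)) (hne : grid ≠ [])
    (hn : 0 < (grid.headD []).length) :
    isPossibleToCutPath grid = isPossibleToCutPath_alt grid := by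
  have hm : (1 : Int) ≤ (grid.length : Int) := by
    cases grid with | nil => exact absurd rfl hne | cons a t => simp
  have hn' : (1 : Int) ≤ ((grid.headD []).length : Int) := by exact_mod_cast hn
  rw [isPossibleToCutPath, isPossibleToCutPath_alt]
  simp only []
  rw [runB_eq_dfsA (grid.length : Int) ((grid.headD []).length : Int) grid
    (((grid.length : Int) + ((grid.headD []).length : Int)).toNat + 1) hm hn' (by omega)]
  rw [runB_eq_dfsA (grid.length : Int) ((grid.headD []).length : Int)
    (dfsA (grid.length : Int) ((grid.headD []).length : Int)
      (((grid.length : Int) + ((grid.headD []).length : Int)).toNat + 1) 0 0 grid).2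
    (((grid.length : Int) + ((grid.headD []).length : Int)).toNat + 1) hm hn' (by omega)]

-- ===== VERDICT (by name: the statement is the Claim_ definition above) =====
theorem isPossibleToCutPath_spec : Claim_equal_isPossibleToCutPath := by
  intro grid _ hpre
  unfold Spec_isPossibleToCutPath
  exact main_eq grid hpre.1 hpre.2.1
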